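-- pv_equiv track=rewrite | github.com/Quark3e/Chromebook-projects | teststuff/bash/ytdlp_stuff/findDiff.py | lastCons
-- ===== SOURCE A (Python) =====
-- import string
--
-- letters = string.ascii_lowercase + string.ascii_uppercase + " -"
--
-- def lastCons(text):
--     count=0
--     spaceCount = 0
--     for x in text:
--         if x==" ": spaceCount+=1
--         else: spaceCount=0
--         if spaceCount>=2: return (count-1)
--         if x in letters: count+=1
--     return count
-- ===== SOURCE B (Python) =====
-- import string
--
-- letters = string.ascii_lowercase + string.ascii_uppercase + " -"
--
-- def lastCons(text):
--     p = text.find("  ")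
--     head = text if p == -1 else text[:p]
--     return sum(1 for c in head if c in letters)
-- ===== Notes on version B (the rewrite author's own statement) =====
-- stated objective: simpler
-- what changed: Replaces A's character-by-character scan with a running letter count and consecutive-space counter (early return on the second space) by a single str.find to locate the first double space, then one comprehension counting letters in the prefix before it.
import Mathlib
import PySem

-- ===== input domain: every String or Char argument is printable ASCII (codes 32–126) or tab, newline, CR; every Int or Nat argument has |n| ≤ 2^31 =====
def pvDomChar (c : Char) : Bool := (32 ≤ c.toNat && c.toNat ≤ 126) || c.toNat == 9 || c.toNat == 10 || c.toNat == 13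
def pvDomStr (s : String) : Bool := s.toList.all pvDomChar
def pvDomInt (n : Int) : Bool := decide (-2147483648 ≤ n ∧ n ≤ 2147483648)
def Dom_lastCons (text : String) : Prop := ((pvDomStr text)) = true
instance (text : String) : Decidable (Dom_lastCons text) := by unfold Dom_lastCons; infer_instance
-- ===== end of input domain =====

-- B replaces A's stateful scan (letter count + consecutive-space counter with an early return)
-- by locating the first "  " with str.find and counting letters in the prefix before it (objective: simpler).

-- letters = string.ascii_lowercase + string.ascii_uppercase + " -"
def pvLetters : List Char := "abcdefghijklmnopqrstuvwxyzABCDEFGHIJKLMNOPQRSTUVWXYZ -".toList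

-- ===== PORT A =====
-- the for-loop of A, state = (count, spaceCount); early return on two consecutive spaces
def lastConsGo : List Char → Int → Int → Int
  | [], count, _ => count
  | x :: xs, count, spaceCount =>
    let sc := if x = ' ' then spaceCount + 1 else 0
    if 2 ≤ sc then count - 1
    else lastConsGo xs (if pvLetters.contains x then count + 1 else count) sc

def lastCons (text : String) : Int := lastConsGo text.toList 0 0

-- ===== PORT B =====
def lastCons_alt (text : String) : Int :=
  let p := PySem.Str.find text "  "
  let head := if p = -1 then text.toList else PySem.List.slice text.toList none (some p)
  ((head.countP (fun c => pvLetters.contains c) : Nat) : Int)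

-- ===== PRECONDITION & SPEC =====
def Spec_lastCons (text : String) (out : Int) : Prop := out = lastCons_alt text
instance (text : String) (out : Int) : Decidable (Spec_lastCons text out) := by unfold Spec_lastCons; infer_instance

-- ===== CLAIM (what is proved, stated in full; the proofs are below) =====
def Claim_equal_lastCons : Prop := ∀ (text : String), Dom_lastCons text → Spec_lastCons text (lastCons text)

-- ===== LEMMAS AND PROOFS =====

-- index of the first pair of consecutive spaces, if any
def pvFp : List Char → Option Nat
  | [] => none
  | x :: xs => if x = ' ' ∧ xs.head? = some ' ' then some 0 else (pvFp xs).map (· + 1)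

def pvCnt (cs : List Char) : Int := ((cs.countP (fun c => pvLetters.contains c) : Nat) : Int)

def pvF (cs : List Char) : Int :=
  match pvFp cs with
  | none => pvCnt cs
  | some j => pvCnt (cs.take j)

lemma pvPairHead {x : Char} {xs : List Char} (hp : [' ', ' '] <+: x :: xs) :
    x = ' ' ∧ xs.head? = some ' ' := by
  obtain ⟨t, ht⟩ := hp
  injection ht with h1 h2
  exact ⟨h1.symm, by rw [← h2]; rfl⟩

lemma pvCnt_cons (x : Char) (xs : List Char) :
    pvCnt (x :: xs) = (if pvLetters.contains x then 1 else 0) + pvCnt xs := by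
  unfold pvCnt
  rw [List.countP_cons]
  split_ifs <;> push_cast <;> ring

lemma pvFp_cons (x : Char) (xs : List Char) (h : ¬ (x = ' ' ∧ xs.head? = some ' ')) :
    pvFp (x :: xs) = (pvFp xs).map (· + 1) := by
  simp [pvFp, h]

lemma pvF_cons (x : Char) (xs : List Char) (h : ¬ (x = ' ' ∧ xs.head? = some ' ')) :
    pvF (x :: xs) = (if pvLetters.contains x then 1 else 0) + pvF xs := by
  unfold pvF
  rw [pvFp_cons x xs h]
  cases hfp : pvFp xs with
  | none => simp [pvCnt_cons]
  | some j => simp [List.take_succ_cons, pvCnt_cons]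

lemma go_cons_nonspace (y : Char) (rest : List Char) (c sc : Int) (h : ¬ y = ' ') :
    lastConsGo (y :: rest) c sc
      = lastConsGo rest (if pvLetters.contains y then c + 1 else c) 0 := by
  simp [lastConsGo, h]

lemma go_eq (cs : List Char) : ∀ count : Int, lastConsGo cs count 0 = count + pvF cs := by
  have hm : (' ' ∈ pvLetters) := by decide
  induction cs with
  | nil => intro count; simp [lastConsGo, pvF, pvFp, pvCnt]
  | cons x xs ih =>
    intro count
    by_cases hx : x = ' '
    · subst hx
      cases xs with
      | nil =>
        simp [lastConsGo, pvF, pvFp, pvCnt, hm]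
      | cons y rest =>
        by_cases hy : y = ' '
        · subst hy
          have h0 : pvF (' ' :: ' ' :: rest) = 0 := by
            simp [pvF, pvFp, pvCnt]
          rw [h0]
          simp [lastConsGo, hm]
        · have hstep : lastConsGo (' ' :: y :: rest) count 0
              = lastConsGo (y :: rest) (count + 1) 1 := by
            conv_lhs => rw [lastConsGo]
            simp [hm]
          rw [hstep, go_cons_nonspace y rest (count + 1) 1 hy,
              ← go_cons_nonspace y rest (count + 1) 0 hy, ih (count + 1)]
          have hF : pvF (' ' :: y :: rest) = 1 + pvF (y :: rest) := by
            rw [pvF_cons ' ' (y :: rest) (by simp [hy])]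
            simp [hm]
          rw [hF]; ring
    · rw [go_cons_nonspace x xs count 0 hx, ih, pvF_cons x xs (by simp [hx])]
      split_ifs <;> ring

lemma pvFp_prefix : ∀ (cs : List Char) (j : Nat), pvFp cs = some j → [' ', ' '] <+: cs.drop j := by
  intro cs
  induction cs with
  | nil => intro j h; simp [pvFp] at h
  | cons x xs ih =>
    intro j h
    unfold pvFp at h
    split_ifs at h with hc
    · cases h
      obtain ⟨hx, hh⟩ := hc
      subst hx
      cases xs with
      | nil => simp at hh
      | cons y rest =>
        simp at hh
        subst hh
        exact ⟨rest, rfl⟩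
    · cases hfp : pvFp xs with
      | none => simp [hfp] at h
      | some j' =>
        simp [hfp] at h
        subst h
        simpa using ih j' hfp

lemma pvFp_min : ∀ (cs : List Char) (j : Nat), pvFp cs = some j →
    ∀ i < j, ¬ [' ', ' '] <+: cs.drop i := by
  intro cs
  induction cs with
  | nil => intro j h; simp [pvFp] at h
  | cons x xs ih =>
    intro j h i hi
    unfold pvFp at h
    split_ifs at h with hc
    · cases h; omega
    · cases hfp : pvFp xs with
      | none => simp [hfp] at h
      | some j' =>
        simp [hfp] at h
        subst h
        cases i with
        | zero => intro hp; exact hc (pvPairHead hp)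
        | succ i' => simpa using ih j' hfp i' (by omega)

lemma pvFp_none : ∀ cs : List Char, pvFp cs = none → ∀ i : Nat, ¬ [' ', ' '] <+: cs.drop i := by
  intro cs
  induction cs with
  | nil => intro _ i hp; rw [List.drop_nil] at hp; simp at hp
  | cons x xs ih =>
    intro h i
    unfold pvFp at h
    split_ifs at h with hc
    · cases hfp : pvFp xs with
      | none =>
        cases i with
        | zero => intro hp; exact hc (pvPairHead hp)
        | succ i' => simpa using ih hfp i'
      | some j' => simp [hfp] at h

lemma find_eq_pvFp (cs : List Char) :
    PySem.Chars.find cs [' ', ' '] =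
      (match pvFp cs with | none => (-1 : Int) | some j => (j : Int)) := by
  cases hfp : pvFp cs with
  | none =>
    simp only
    rw [PySem.Chars.find_eq_neg_one_iff]
    intro hinf
    have hIn : PySem.Chars.isIn [' ', ' '] cs = true := (PySem.Chars.isIn_iff_infix _ _).mpr hinf
    obtain ⟨j, hj⟩ := (PySem.Chars.exists_prefix_drop_iff_isIn _ _).mpr hIn
    exact pvFp_none cs hfp j hj
  | some j =>
    simp only
    have hpre := pvFp_prefix cs j hfp
    have hIn : PySem.Chars.isIn [' ', ' '] cs = true :=
      (PySem.Chars.exists_prefix_drop_iff_isIn _ _).mp ⟨j, hpre⟩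
    have hnn : 0 ≤ PySem.Chars.find cs [' ', ' '] :=
      (PySem.Chars.find_nonneg_iff _ _).mpr ((PySem.Chars.isIn_iff_infix _ _).mp hIn)
    obtain ⟨hfpre, hfmin⟩ := PySem.Chars.find_spec hnn
    have hkj : (PySem.Chars.find cs [' ', ' ']).toNat = j := by
      by_contra hne
      rcases Nat.lt_or_ge (PySem.Chars.find cs [' ', ' ']).toNat j with hlt | hge
      · exact pvFp_min cs j hfp _ hlt hfpre
      · exact hfmin j (by omega) hpre
    omega

lemma alt_eq_F (text : String) : lastCons_alt text = pvF text.toList := by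
  unfold lastCons_alt
  have hfind : PySem.Str.find text "  " = PySem.Chars.find text.toList [' ', ' '] := by
    simp [PySem.Str.find_eq]
  rw [hfind, find_eq_pvFp]
  cases hfp : pvFp text.toList with
  | none => simp [pvF, hfp, pvCnt]
  | some j =>
    have hne : ((j : Int)) ≠ -1 := by omega
    simp [hne, PySem.List.slice_to_natCast, pvF, hfp, pvCnt]

-- ===== VERDICT (by name: the statement is the Claim_ definition above) =====
theorem lastCons_spec : Claim_equal_lastCons := by
  intro text _
  unfold Spec_lastCons lastCons
  rw [go_eq text.toList 0, alt_eq_F]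
  ring
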